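-- pv_equiv track=rewrite | github.com/TahjaeJackson/CS1_Projects | EXAM2/Question4.py | no_common_chars
-- ===== SOURCE A (Python) =====
-- def no_common_chars(slist,gstr):
--     uniquelist = []
--     for x in slist:
--         found = False
--         for i in range(0, len(x)):
--             for j in range(0, len(gstr)):
--                 if x[i] == gstr[j]:
--                     found = True
--                     break
--             if found == True:
--                 break
--         if found == False:
--             uniquelist.append(x)
--
--     return uniquelist
-- ===== SOURCE B (Python) =====
-- def no_common_chars(slist, gstr):
--     # Sieve: successively eliminate, for each character of gstr,
--     # every still-surviving string that contains it.
--     survivors = list(slist)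
--     for c in gstr:
--         survivors = [x for x in survivors if c not in x]
--     return survivors
-- ===== Notes on version B (the rewrite author's own statement) =====
-- stated objective: alternative
-- what changed: Inverts the loop nesting: instead of A's per-string triple-nested character scan of gstr with a found flag, B loops over gstr's characters and successively filters the surviving strings (a sieve), returning what remains.
import Mathlib
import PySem

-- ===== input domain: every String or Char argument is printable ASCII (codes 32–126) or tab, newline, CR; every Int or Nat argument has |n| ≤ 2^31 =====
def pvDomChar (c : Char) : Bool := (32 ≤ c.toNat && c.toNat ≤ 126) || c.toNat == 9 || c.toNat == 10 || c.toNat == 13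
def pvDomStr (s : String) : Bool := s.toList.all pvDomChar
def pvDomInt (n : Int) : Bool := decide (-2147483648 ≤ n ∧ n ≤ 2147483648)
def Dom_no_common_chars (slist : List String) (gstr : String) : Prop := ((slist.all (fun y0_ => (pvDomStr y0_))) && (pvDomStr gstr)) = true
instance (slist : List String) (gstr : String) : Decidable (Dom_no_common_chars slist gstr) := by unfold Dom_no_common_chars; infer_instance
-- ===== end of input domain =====

-- B inverts the loop nesting: it loops over gstr's characters, successively filtering the
-- surviving strings (a sieve), instead of A's per-string triple-nested scan with a found flag.

-- ===== PORT A =====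
-- inner 'for j in range(0, len(gstr)): if x[i] == gstr[j]: found = True; break'
def pvAInner (c : Char) : List Char → Bool
  | [] => false
  | g :: gs => if c == g then true else pvAInner c gs

-- outer 'for i in range(0, len(x)): …; if found == True: break'
def pvAOuter (gs : List Char) : List Char → Bool
  | [] => false
  | c :: cs => if pvAInner c gs then true else pvAOuter gs cs

def no_common_chars (slist : List String) (gstr : String) : List String :=
  slist.foldl (fun uniquelist x =>
    if pvAOuter gstr.toList x.toList then uniquelist else uniquelist ++ [x]) []

-- ===== PORT B =====
-- 'c not in x' with a 1-character c is exactly character non-membership in x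
def no_common_chars_alt (slist : List String) (gstr : String) : List String :=
  gstr.toList.foldl (fun survivors c =>
    survivors.filter (fun x => !(x.toList.contains c))) slist

-- ===== PRECONDITION & SPEC =====
def Spec_no_common_chars (slist : List String) (gstr : String) (out : List String) : Prop := out = no_common_chars_alt slist gstr
instance (slist : List String) (gstr : String) (out : List String) : Decidable (Spec_no_common_chars slist gstr out) := by unfold Spec_no_common_chars; infer_instance

-- ===== CLAIM (what is proved, stated in full; the proofs are below) =====
def Claim_equal_no_common_chars : Prop := ∀ (slist : List String) (gstr : String), Dom_no_common_chars slist gstr → Spec_no_common_chars slist gstr (no_common_chars slist gstr)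

-- ===== LEMMAS AND PROOFS =====

lemma pvAInner_eq_mem (c : Char) (gs : List Char) : pvAInner c gs = decide (c ∈ gs) := by
  induction gs with
  | nil => simp [pvAInner]
  | cons g gs ih =>
    simp only [pvAInner, ih]
    by_cases h : c = g <;> simp [h]

lemma pvAOuter_eq_exists (gs cs : List Char) :
    pvAOuter gs cs = decide (∃ c ∈ cs, c ∈ gs) := by
  induction cs with
  | nil => simp [pvAOuter]
  | cons c cs ih =>
    simp only [pvAOuter, pvAInner_eq_mem, ih]
    by_cases h : c ∈ gs <;> simp [h]

-- A as one filter over slist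
lemma pvA_eq_filter (slist : List String) (gs : List Char) :
    slist.foldl (fun u x => if pvAOuter gs x.toList then u else u ++ [x]) []
      = slist.filter (fun x => !pvAOuter gs x.toList) := by
  have h : (fun (u : List String) x => if pvAOuter gs x.toList then u else u ++ [x])
      = (fun u x => if (fun y => !pvAOuter gs y.toList) x then u ++ [id x] else u) := by
    funext u x; cases hp : pvAOuter gs x.toList <;> simp [hp]
  rw [h, PySem.List.foldl_append_if _ id slist []]
  simp

-- B's sieve as one filter over the initial list
lemma pvB_eq_filter (gs : List Char) (l : List String) :
    gs.foldl (fun survivors c => survivors.filter (fun x => !(x.toList.contains c))) l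
      = l.filter (fun x => gs.all (fun c => !(x.toList.contains c))) := by
  induction gs generalizing l with
  | nil => simp
  | cons c gs ih =>
    simp only [List.foldl_cons, ih, List.filter_filter]
    congr 1
    funext x
    simp [List.all_cons, Bool.and_comm]

-- ===== VERDICT (by name: the statement is the Claim_ definition above) =====
theorem no_common_chars_spec : Claim_equal_no_common_chars := by
  intro slist gstr _
  unfold Spec_no_common_chars no_common_chars no_common_chars_alt
  rw [pvA_eq_filter, pvB_eq_filter]
  congr 1
  funext x
  rw [pvAOuter_eq_exists, Bool.eq_iff_iff]
  simp only [decide_eq_false_iff_not, List.all_eq_true, Bool.not_eq_eq_eq_not,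
    Bool.not_true, List.contains_eq_mem, decide_eq_false_iff_not]
  constructor
  · intro h c hc hx; exact h ⟨c, hx, hc⟩
  · rintro h ⟨c, hc, hg⟩; exact h c hg hc
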